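-- pv_equiv track=rewrite | github.com/Abdulrahman-Alwagdani/UNIT-1-PROJECT | validation.py | is_alphabetic
-- ===== SOURCE A (Python) =====
-- def is_alphabetic(string: str) -> bool:
--     '''
--     Checks if a string is alphbetic.
--
--     Args:
--         string (str): A name of a user.
--
--     Returns: True if the string as alphabetic.
--             False otherwise.
--     '''
--     check_list: list = string.split()
--     for name in check_list:
--         if name.isalpha():
--             continue
--         else:
--             return False
--     return True
-- ===== SOURCE B (Python) =====
-- def is_alphabetic(string: str) -> bool:
--     '''
--     Checks if a string is alphabetic.
--
--     Single character-level pass: every character must be alphabetic or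
--     whitespace. Tokens produced by str.split() are exactly the maximal
--     runs of non-whitespace characters, so this is equivalent.
--     '''
--     return all(c.isalpha() or c.isspace() for c in string)
-- ===== Notes on version B (the rewrite author's own statement) =====
-- stated objective: simpler
-- what changed: Replaced split-into-tokens plus per-token isalpha loop with a single character-level pass testing isalpha-or-isspace on each character, with no split and no intermediate list.
import Mathlib
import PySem

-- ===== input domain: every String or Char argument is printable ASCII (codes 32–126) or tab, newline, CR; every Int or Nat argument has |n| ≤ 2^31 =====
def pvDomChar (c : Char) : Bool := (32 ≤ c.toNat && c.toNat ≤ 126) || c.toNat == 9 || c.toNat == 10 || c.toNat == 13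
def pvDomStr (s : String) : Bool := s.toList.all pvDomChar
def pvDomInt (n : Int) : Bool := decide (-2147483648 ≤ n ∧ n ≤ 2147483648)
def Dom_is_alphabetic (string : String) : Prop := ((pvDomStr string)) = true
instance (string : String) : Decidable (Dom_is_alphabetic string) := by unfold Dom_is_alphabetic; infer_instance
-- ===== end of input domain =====

-- B replaces split()-then-token-isalpha with one character-level pass (alpha-or-space); simpler, no intermediate list.


-- ===== PORT A =====
-- the 'for name in check_list: … return False … / return True' loop, early return kept
def is_alphabetic.loop : List String → Bool
  | [] => true
  | name :: rest => if PySem.Str.strIsalpha name then is_alphabetic.loop rest else false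

def is_alphabetic (string : String) : Bool :=
  is_alphabetic.loop (PySem.Str.split₀ string)

-- ===== PORT B =====
def is_alphabetic_alt (string : String) : Bool :=
  string.toList.all (fun c => PySem.Chars.isalpha c || PySem.Chars.isspace c)

-- ===== PRECONDITION & SPEC =====
def Spec_is_alphabetic (string : String) (out : Bool) : Prop := out = is_alphabetic_alt string
instance (string : String) (out : Bool) : Decidable (Spec_is_alphabetic string out) := by unfold Spec_is_alphabetic; infer_instance

-- ===== CLAIM (what is proved, stated in full; the proofs are below) =====
def Claim_equal_is_alphabetic : Prop := ∀ (string : String), Dom_is_alphabetic string → Spec_is_alphabetic string (is_alphabetic string)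

-- ===== LEMMAS AND PROOFS =====
lemma loop_eq_all (l : List String) : is_alphabetic.loop l = l.all PySem.Str.strIsalpha := by
  induction l with
  | nil => rfl
  | cons a t ih =>
    simp only [is_alphabetic.loop, List.all_cons]
    by_cases h : PySem.Str.strIsalpha a <;> simp [ih]

lemma go_all (s cur : List Char) (acc : List (List Char)) :
    ((PySem.Chars.split₀.go s cur acc).all PySem.Chars.strIsalpha)
      = (acc.all PySem.Chars.strIsalpha && cur.all PySem.Chars.isalpha
          && s.all (fun c => PySem.Chars.isalpha c || PySem.Chars.isspace c)) := by
  induction s generalizing cur acc with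
  | nil =>
    by_cases hc : cur = []
    · simp [PySem.Chars.split₀.go, hc]
    · simp only [PySem.Chars.split₀.go, List.isEmpty_iff, hc, if_false, List.all_reverse,
        List.all_cons, List.all_nil, PySem.Chars.strIsalpha, List.isEmpty_reverse, List.all_reverse]
      have he : cur.isEmpty = false := by simpa using hc
      simp only [he, Bool.not_false, Bool.true_and]
      ac_rfl
  | cons c rest ih =>
    by_cases hs : PySem.Chars.isspace c
    · by_cases hc : cur = []
      · simp [PySem.Chars.split₀.go, hs, hc, ih]
      · simp only [PySem.Chars.split₀.go, hs, if_true, List.isEmpty_iff, hc, if_false, ih,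
          List.all_cons, List.all_reverse, PySem.Chars.strIsalpha, List.isEmpty_reverse]
        have he : cur.isEmpty = false := by simpa using hc
        simp only [he, Bool.not_false, Bool.true_and, List.all_nil, Bool.and_true,
          Bool.or_true]
        ac_rfl
    · simp only [PySem.Chars.split₀.go, hs, Bool.false_eq_true, if_false, ih, List.all_cons]
      ac_rfl

-- ===== VERDICT (by name: the statement is the Claim_ definition above) =====
theorem is_alphabetic_spec : Claim_equal_is_alphabetic := by
  intro s _
  unfold Spec_is_alphabetic is_alphabetic is_alphabetic_alt
  rw [loop_eq_all]
  simp only [PySem.Str.split₀, List.all_map]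
  have hfun : (PySem.Str.strIsalpha ∘ String.ofList) = PySem.Chars.strIsalpha := by
    funext a; simp [Function.comp, PySem.Str.strIsalpha]
  rw [hfun]
  rw [PySem.Chars.split₀, go_all]
  simp
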